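-- pv_equiv track=rewrite | github.com/Aasthaengg/IBMdataset | Python_codes/p03487/s642291465.py | solve
-- ===== SOURCE A (Python) =====
-- from collections import Counter
--
-- def solve(n,a):
--   d = Counter(a)
--   res = 0
--   for k,v in d.items():
--     if k <= v:
--       res += v-k
--     else:
--       res += v
--   return res
-- ===== SOURCE B (Python) =====
-- def solve(n, a):
--     # sort-then-run-length scan instead of a Counter hash tally
--     res = 0
--     s = sorted(a)
--     m = len(s)
--     i = 0
--     while i < m:
--         j = i
--         while j < m and s[j] == s[i]:
--             j += 1
--         k = s[i]
--         v = j - i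
--         res += v - k if k <= v else v
--         i = j
--     return res
-- ===== Notes on version B (the rewrite author's own statement) =====
-- stated objective: alternative
-- what changed: Replaces the Counter hash tally and dict-items loop by sorting a copy of the list and scanning consecutive equal runs, accumulating each run's contribution from its value and run length.
import Mathlib
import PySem

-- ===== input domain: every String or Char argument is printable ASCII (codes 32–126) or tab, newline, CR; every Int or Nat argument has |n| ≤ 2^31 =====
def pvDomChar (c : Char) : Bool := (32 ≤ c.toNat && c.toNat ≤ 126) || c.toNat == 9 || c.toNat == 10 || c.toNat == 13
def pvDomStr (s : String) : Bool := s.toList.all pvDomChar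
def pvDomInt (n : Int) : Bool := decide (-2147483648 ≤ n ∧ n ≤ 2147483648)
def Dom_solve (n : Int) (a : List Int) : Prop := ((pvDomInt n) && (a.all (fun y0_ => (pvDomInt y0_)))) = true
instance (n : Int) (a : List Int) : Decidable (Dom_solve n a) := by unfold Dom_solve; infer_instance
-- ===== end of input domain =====

-- B replaces A's Counter tally and dict-items loop by sort-then-run-length scanning (alternative decomposition, same results).

-- ===== PORT A =====
def solve (n : Int) (a : List Int) : Int :=
  let d := PySem.Dict.counter a
  d.items.foldl
    (fun res kv => if kv.1 ≤ kv.2 then res + (kv.2 - kv.1) else res + kv.2) 0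

-- ===== PORT B =====
-- the outer while loop of Source B: each step consumes one run of equal values
def solveRuns : List Int → Int
  | [] => 0
  | x :: rest =>
    let v : Int := 1 + ((rest.takeWhile (fun z => z == x)).length : Int)
    (if x ≤ v then v - x else v) + solveRuns (rest.dropWhile (fun z => z == x))
termination_by l => l.length
decreasing_by
  simp only [List.length_cons]
  have := List.length_dropWhile_le (fun z => z == x) rest
  omega

def solve_alt (n : Int) (a : List Int) : Int :=
  solveRuns (PySem.List.sorted a (fun x => x) false)

-- ===== PRECONDITION & SPEC =====
def Spec_solve (n : Int) (a : List Int) (out : Int) : Prop := out = solve_alt n a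
instance (n : Int) (a : List Int) (out : Int) : Decidable (Spec_solve n a out) := by unfold Spec_solve; infer_instance

-- ===== CLAIM (what is proved, stated in full; the proofs are below) =====
def Claim_equal_solve : Prop := ∀ (n : Int) (a : List Int), Dom_solve n a → Spec_solve n a (solve n a)

-- ===== LEMMAS AND PROOFS =====

-- the per-key contribution both programs compute
def pvContrib (k v : Int) : Int := if k ≤ v then v - k else v

lemma solve_eq_sum (n : Int) (a : List Int) :
    solve n a = ((PySem.Set.ofList a).map (fun k => pvContrib k (a.count k))).sum := by
  show List.foldl
      (fun res kv => if kv.1 ≤ kv.2 then res + (kv.2 - kv.1) else res + kv.2) 0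
      (PySem.Dict.counter a).items = _
  rw [show (PySem.Dict.counter a).items =
        (PySem.Set.ofList a).map (fun k => (k, ((a.count k : Nat) : Int))) from
      PySem.Dict.items_counter a]
  rw [List.foldl_map]
  have h : (fun (res : Int) (k : Int) =>
        if k ≤ ((a.count k : Nat) : Int) then res + (((a.count k : Nat) : Int) - k)
        else res + ((a.count k : Nat) : Int)) =
      (fun res k => res + pvContrib k (a.count k)) := by
    funext res k
    unfold pvContrib
    split <;> rfl
  rw [h, PySem.List.foldl_add]
  simp

lemma not_mem_dropWhile_of_sorted (x : Int) (rest : List Int)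
    (h : List.Pairwise (· ≤ ·) (x :: rest)) :
    x ∉ rest.dropWhile (fun z => z == x) := by
  induction rest with
  | nil => simp
  | cons y ys ih =>
    obtain ⟨hx, hy⟩ := List.pairwise_cons.mp h
    rw [List.dropWhile_cons]
    by_cases hxy : (y == x) = true
    · have hyx : y = x := by simpa using hxy
      simp only [hxy, if_true]
      apply ih
      apply List.pairwise_cons.mpr
      refine ⟨?_, (List.pairwise_cons.mp hy).2⟩
      intro z hz
      have h1 := (List.pairwise_cons.mp hy).1 z hz
      omega
    · simp only [hxy]
      intro hmem
      have hxley : x ≤ y := hx y (List.mem_cons_self ..)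
      have hne : y ≠ x := by simpa using hxy
      rcases List.mem_cons.mp hmem with h1 | h2
      · exact hne h1.symm
      · have : y ≤ x := (List.pairwise_cons.mp hy).1 x h2
        exact hne (le_antisymm this hxley)

lemma count_head_sorted (x : Int) (rest : List Int)
    (h : List.Pairwise (· ≤ ·) (x :: rest)) :
    ((x :: rest).count x : Int) = 1 + ((rest.takeWhile (fun z => z == x)).length : Int) := by
  have hsplit : rest.takeWhile (fun z => z == x) ++ rest.dropWhile (fun z => z == x) = rest :=
    List.takeWhile_append_dropWhile
  have h1 : rest.count x = (rest.takeWhile (fun z => z == x)).count x +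
      (rest.dropWhile (fun z => z == x)).count x := by
    conv_lhs => rw [← hsplit]
    rw [List.count_append]
  have h2 : (rest.takeWhile (fun z => z == x)).count x =
      (rest.takeWhile (fun z => z == x)).length := by
    rw [List.count_eq_length]
    intro y hy
    have hyx : y = x := by simpa using List.mem_takeWhile_imp hy
    simp [hyx]
  have h3 : (rest.dropWhile (fun z => z == x)).count x = 0 :=
    List.count_eq_zero.mpr (not_mem_dropWhile_of_sorted x rest h)
  rw [List.count_cons_self]
  push_cast
  omega

lemma count_tail_sorted (x : Int) (rest : List Int) (k : Int)
    (h : List.Pairwise (· ≤ ·) (x :: rest))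
    (hk : k ∈ rest.dropWhile (fun z => z == x)) :
    (x :: rest).count k = (rest.dropWhile (fun z => z == x)).count k := by
  have hkx : k ≠ x := fun he => not_mem_dropWhile_of_sorted x rest h (he ▸ hk)
  have hsplit : rest.takeWhile (fun z => z == x) ++ rest.dropWhile (fun z => z == x) = rest :=
    List.takeWhile_append_dropWhile
  have ht : (rest.takeWhile (fun z => z == x)).count k = 0 := by
    rw [List.count_eq_zero]
    intro hkt
    exact hkx (by simpa using List.mem_takeWhile_imp hkt)
  have h1 : rest.count k = (rest.takeWhile (fun z => z == x)).count k +
      (rest.dropWhile (fun z => z == x)).count k := by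
    conv_lhs => rw [← hsplit]
    rw [List.count_append]
  rw [List.count_cons_of_ne (Ne.symm hkx)]
  omega

lemma solveRuns_eq_sum (l : List Int) (h : List.Pairwise (· ≤ ·) l) :
    solveRuns l = ((PySem.Set.ofList l).map (fun k => pvContrib k (l.count k))).sum := by
  induction l using solveRuns.induct with
  | case1 => simp [solveRuns, PySem.Set.ofList]
  | case2 x rest ih =>
    have hd : List.Pairwise (· ≤ ·) (rest.dropWhile (fun z => z == x)) :=
      List.Pairwise.sublist ((List.dropWhile_sublist _).trans (List.sublist_cons_self x rest)) h
    have hxd : x ∉ rest.dropWhile (fun z => z == x) := not_mem_dropWhile_of_sorted x rest h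
    have hdsub : ∀ z ∈ rest.dropWhile (fun z => z == x), z ∈ rest :=
      fun z hz => (List.dropWhile_sublist _).mem hz
    have hperm : (PySem.Set.ofList (x :: rest)).Perm
        (x :: PySem.Set.ofList (rest.dropWhile (fun z => z == x))) := by
      apply (List.perm_ext_iff_of_nodup (PySem.Set.nodup_ofList _) ?_).mpr
      · intro z
        rw [PySem.Set.mem_ofList, List.mem_cons, List.mem_cons, PySem.Set.mem_ofList]
        constructor
        · rintro (rfl | hz)
          · exact Or.inl rfl
          · conv at hz => rw [← List.takeWhile_append_dropWhile (p := fun z => z == x) (l := rest)]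
            rcases List.mem_append.mp hz with h1 | h2
            · exact Or.inl (by simpa using List.mem_takeWhile_imp h1)
            · exact Or.inr h2
        · rintro (rfl | hz)
          · exact Or.inl rfl
          · exact Or.inr (hdsub z hz)
      · exact List.nodup_cons.mpr ⟨fun hc => hxd ((PySem.Set.mem_ofList _ _).mp hc),
          PySem.Set.nodup_ofList _⟩
    rw [solveRuns]
    rw [(hperm.map (fun k => pvContrib k ((x :: rest).count k))).sum_eq]
    rw [List.map_cons, List.sum_cons]
    have hgx : pvContrib x (((x :: rest).count x : Nat) : Int) =
        (if x ≤ 1 + ((rest.takeWhile (fun z => z == x)).length : Int)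
         then 1 + ((rest.takeWhile (fun z => z == x)).length : Int) - x
         else 1 + ((rest.takeWhile (fun z => z == x)).length : Int)) := by
      rw [show (((x :: rest).count x : Nat) : Int) =
            1 + ((rest.takeWhile (fun z => z == x)).length : Int) from
          count_head_sorted x rest h]
      rfl
    have hmap : (PySem.Set.ofList (rest.dropWhile (fun z => z == x))).map
          (fun k => pvContrib k ((x :: rest).count k)) =
        (PySem.Set.ofList (rest.dropWhile (fun z => z == x))).map
          (fun k => pvContrib k ((rest.dropWhile (fun z => z == x)).count k)) := by
      apply List.map_congr_left
      intro k hkmem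
      rw [count_tail_sorted x rest k h ((PySem.Set.mem_ofList _ _).mp hkmem)]
    rw [hgx, hmap, ih hd]

theorem solve_eq_alt (n : Int) (a : List Int) : solve n a = solve_alt n a := by
  rw [solve_eq_sum]
  unfold solve_alt
  have hp : (PySem.List.sorted a (fun x => x) false).Perm a :=
    PySem.List.sorted_perm a (fun x => x) false
  rw [solveRuns_eq_sum _ (PySem.List.sorted_pairwise a (fun x => x))]
  have hmap : (PySem.Set.ofList (PySem.List.sorted a (fun x => x) false)).map
        (fun k => pvContrib k ((PySem.List.sorted a (fun x => x) false).count k)) =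
      (PySem.Set.ofList (PySem.List.sorted a (fun x => x) false)).map
        (fun k => pvContrib k (a.count k)) := by
    apply List.map_congr_left
    intro k _
    rw [hp.count_eq]
  rw [hmap]
  have hperm : (PySem.Set.ofList a).Perm
      (PySem.Set.ofList (PySem.List.sorted a (fun x => x) false)) := by
    apply (List.perm_ext_iff_of_nodup (PySem.Set.nodup_ofList _) (PySem.Set.nodup_ofList _)).mpr
    intro z
    rw [PySem.Set.mem_ofList, PySem.Set.mem_ofList, hp.mem_iff]
  exact (hperm.map (fun k => pvContrib k (a.count k))).sum_eq

-- ===== VERDICT (by name: the statement is the Claim_ definition above) =====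
theorem solve_spec : Claim_equal_solve := by
  intro n a _
  unfold Spec_solve
  exact solve_eq_alt n a
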